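-- pv_equiv track=rewrite | github.com/ThomasJonesDev/CrazyEights | src/twitchplays/twitch_crowdsourcing.py | _filter_answers
-- ===== SOURCE A (Python) =====
-- VALUES: tuple[str, ...] = (
--     "A",
--     "2",
--     "3",
--     "4",
--     "5",
--     "6",
--     "7",
--     "8",
--     "9",
--     "10",
--     "J",
--     "Q",
--     "K",
-- )
--
-- SUITS: tuple[str, ...] = ("S", "C", "H", "D")
--
-- def _filter_answers(dictionary: dict[str, str]) -> dict[str, str]:
--     """Checks each message in the dictionary and remove any messages that dont follow the required format to choose a card e.g. "5S" for 5 of spades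
--
--     Args:
--         dictionary (dict[str, str]): dictionary of twitch-username : message
--
--     Returns:
--         dict[str, str]: filtered dictionary of twitch-username : message
--     """
--     filtered_dictionary: dict[str, str] = {}
--
--     for player, answer in dictionary.items():
--         answer = answer.upper()
--         if len(answer) == 3:
--             for suit in SUITS:
--                 if answer[0] == "1" and answer[1] == "0":
--                     if answer[2] == suit:
--                         filtered_dictionary[player] = answer
--         elif len(answer) == 2:
--             for suit in SUITS:
--                 for value in VALUES:
--                     if answer[0] == value and answer[1] == suit:
--                         filtered_dictionary[player] = answer
--
--     return filtered_dictionary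
-- ===== SOURCE B (Python) =====
-- VALUES: tuple[str, ...] = (
--     "A", "2", "3", "4", "5", "6", "7", "8", "9", "10", "J", "Q", "K",
-- )
--
-- SUITS: tuple[str, ...] = ("S", "C", "H", "D")
--
-- # Every acceptable message, precomputed once: "10S"-style 3-char codes and
-- # "5S"-style 2-char codes are both covered because "10" is in VALUES.
-- VALID = frozenset(v + s for v in VALUES for s in SUITS)
--
--
-- def _filter_answers(dictionary: dict[str, str]) -> dict[str, str]:
--     filtered_dictionary: dict[str, str] = {}
--     for player, answer in dictionary.items():
--         answer = answer.upper()
--         if answer in VALID: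
--             filtered_dictionary[player] = answer
--     return filtered_dictionary
-- ===== Notes on version B (the rewrite author's own statement) =====
-- stated objective: simpler
-- what changed: Replaced the length branch and the nested suit/value scans per message by a single membership test against a precomputed set of all 52 valid card codes.
import Mathlib
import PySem

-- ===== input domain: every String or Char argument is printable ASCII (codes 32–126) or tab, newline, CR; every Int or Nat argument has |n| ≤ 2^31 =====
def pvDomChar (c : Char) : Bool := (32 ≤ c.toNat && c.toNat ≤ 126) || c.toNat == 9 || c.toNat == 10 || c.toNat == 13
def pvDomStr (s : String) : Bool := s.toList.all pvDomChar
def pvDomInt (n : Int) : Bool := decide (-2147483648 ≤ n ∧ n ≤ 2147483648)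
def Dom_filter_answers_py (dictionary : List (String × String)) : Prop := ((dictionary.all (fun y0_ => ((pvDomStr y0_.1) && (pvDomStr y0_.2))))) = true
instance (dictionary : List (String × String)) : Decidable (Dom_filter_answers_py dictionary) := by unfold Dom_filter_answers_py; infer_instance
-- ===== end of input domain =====

-- ===== PORT A =====
-- B replaces A's per-message length branch with nested suit/value scans by one
-- membership test in a precomputed list of all 52 valid card codes (objective: simpler).
-- Card-code comparisons are ported on List Char (Python's 1-char strings answer[i]
-- become chars / singleton char lists); List.getD indexing is exact because it only
-- happens under the length checks, where Python cannot raise.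

def pvVALUES : List (List Char) :=
  [['A'], ['2'], ['3'], ['4'], ['5'], ['6'], ['7'], ['8'], ['9'], ['1','0'], ['J'], ['Q'], ['K']]

def pvSUITS : List (List Char) := [['S'], ['C'], ['H'], ['D']]

def filter_answers_py (dictionary : List (String × String)) : List (String × String) :=
  (dictionary.foldl
    (fun filtered pair =>
      let answer := PySem.Str.upper pair.2
      let cs := answer.toList
      if cs.length == 3 then
        pvSUITS.foldl
          (fun filtered suit =>
            if cs.getD 0 ' ' == '1' && cs.getD 1 ' ' == '0' then
              if [cs.getD 2 ' '] == suit then filtered.insert pair.1 answer else filtered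
            else filtered) filtered
      else if cs.length == 2 then
        pvSUITS.foldl
          (fun filtered suit =>
            pvVALUES.foldl
              (fun filtered value =>
                if [cs.getD 0 ' '] == value && [cs.getD 1 ' '] == suit then
                  filtered.insert pair.1 answer
                else filtered) filtered) filtered
      else filtered)
    PySem.Dict.empty).items

-- ===== PORT B =====
-- everything a message may be, precomputed once (Source B's VALID frozenset)
def pvVALID : List (List Char) := pvVALUES.flatMap (fun v => pvSUITS.map (fun s => v ++ s))

def filter_answers_py_alt (dictionary : List (String × String)) : List (String × String) :=
  (dictionary.foldl
    (fun filtered pair =>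
      let answer := PySem.Str.upper pair.2
      if pvVALID.contains answer.toList then filtered.insert pair.1 answer else filtered)
    PySem.Dict.empty).items

-- ===== PRECONDITION & SPEC =====
def Spec_filter_answers_py (dictionary : List (String × String)) (out : List (String × String)) : Prop := out = filter_answers_py_alt dictionary
instance (dictionary : List (String × String)) (out : List (String × String)) : Decidable (Spec_filter_answers_py dictionary out) := by unfold Spec_filter_answers_py; infer_instance

-- ===== CLAIM (what is proved, stated in full; the proofs are below) =====
def Claim_equal_filter_answers_py : Prop := ∀ (dictionary : List (String × String)), Dom_filter_answers_py dictionary → Spec_filter_answers_py dictionary (filter_answers_py dictionary)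

-- ===== LEMMAS AND PROOFS =====

-- nested guards inserting the same pair collapse to one conjoined guard
theorem pv_ite_and {γ : Type} (a b : Bool) (x y : γ) :
    (if a then (if b then x else y) else y) = if a && b then x else y := by
  cases a <;> simp

-- a fold that conditionally inserts the SAME key/value collapses to one conditional insert
theorem pv_foldl_if_insert {α : Type} (l : List α) (p : α → Bool)
    (d : PySem.Dict String String) (k v : String) :
    l.foldl (fun d x => if p x then d.insert k v else d) d
      = if l.any p then d.insert k v else d := by
  induction l generalizing d with
  | nil => simp
  | cons x t ih =>
    by_cases h : p x = true
    · rw [List.foldl_cons, if_pos h, ih, List.any_cons, h]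
      simp only [Bool.true_or, if_true]
      split
      · rw [PySem.Dict.insert_insert_self]
      · rfl
    · rw [List.foldl_cons, if_neg h, ih, List.any_cons,
        Bool.of_not_eq_true h, Bool.false_or]

-- per-message acceptance: A's length branch with nested scans fires iff the code is in pvVALID
set_option maxHeartbeats 1000000 in
theorem pv_acc (cs : List Char) :
    (if cs.length == 3 then
        pvSUITS.any (fun suit => (cs.getD 0 ' ' == '1' && cs.getD 1 ' ' == '0') && [cs.getD 2 ' '] == suit)
     else if cs.length == 2 then
        pvSUITS.any (fun s => pvVALUES.any (fun v => [cs.getD 0 ' '] == v && [cs.getD 1 ' '] == s))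
     else false) = pvVALID.contains cs := by
  match cs with
  | [] => simp [pvVALID, pvVALUES, pvSUITS]
  | [a] => simp [pvVALID, pvVALUES, pvSUITS]
  | [a, b] =>
    by_cases hS : b = 'S'
    · subst hS; simp [pvVALID, pvVALUES, pvSUITS]; rw [Bool.eq_iff_iff]; simp
    · by_cases hC : b = 'C'
      · subst hC; simp [pvVALID, pvVALUES, pvSUITS]; rw [Bool.eq_iff_iff]; simp
      · by_cases hH : b = 'H'
        · subst hH; simp [pvVALID, pvVALUES, pvSUITS]; rw [Bool.eq_iff_iff]; simp
        · by_cases hD : b = 'D'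
          · subst hD; simp [pvVALID, pvVALUES, pvSUITS]; rw [Bool.eq_iff_iff]; simp
          · simp [pvVALID, pvVALUES, pvSUITS, hS, hC, hH, hD]
  | [a, b, c] =>
    by_cases h1 : a = '1'
    · by_cases h0 : b = '0'
      · subst h1; subst h0; simp [pvVALID, pvVALUES, pvSUITS]; rw [Bool.eq_iff_iff]; simp
      · simp [pvVALID, pvVALUES, pvSUITS, h1, h0]
    · simp [pvVALID, pvVALUES, pvSUITS, h1]
  | a :: b :: c :: e :: t =>
    simp [pvVALID, pvVALUES, pvSUITS]

-- one loop iteration of A equals one loop iteration of B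
theorem pv_step (d : PySem.Dict String String) (k w : String) :
    (if w.toList.length == 3 then
       pvSUITS.foldl
         (fun f suit =>
           if w.toList.getD 0 ' ' == '1' && w.toList.getD 1 ' ' == '0' then
             if [w.toList.getD 2 ' '] == suit then f.insert k w else f
           else f) d
     else if w.toList.length == 2 then
       pvSUITS.foldl
         (fun f s =>
           pvVALUES.foldl
             (fun f v =>
               if [w.toList.getD 0 ' '] == v && [w.toList.getD 1 ' '] == s then f.insert k w
               else f) f) d
     else d)
    = if pvVALID.contains w.toList then d.insert k w else d := by
  rw [← pv_acc w.toList]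
  generalize w.toList = cs
  by_cases h3 : (cs.length == 3) = true
  · simp only [h3, if_true]
    simp only [pv_ite_and, pv_foldl_if_insert]
  · by_cases h2 : (cs.length == 2) = true
    · simp only [h3, h2, if_true, if_false, Bool.false_eq_true]
      simp only [pv_foldl_if_insert]
    · simp only [h3, h2, if_false, Bool.false_eq_true]

-- ===== VERDICT (by name: the statement is the Claim_ definition above) =====
theorem filter_answers_py_spec : Claim_equal_filter_answers_py := by
  intro dictionary _
  unfold Spec_filter_answers_py filter_answers_py filter_answers_py_alt
  congr 1
  apply List.foldl_ext
  intro d pair _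
  exact pv_step d pair.1 (PySem.Str.upper pair.2)
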